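-- pv_equiv track=rewrite | github.com/tomdu3/free-codecamp-challenges | daily_challenge_fcc/2026/2026-01/26-01-29/letters_numbers.py | separate_letters_and_numbers
-- ===== SOURCE A (Python) =====
-- def separate_letters_and_numbers(s):
--     prev = None
--     result = ""
--
--     for char in s:
--         if prev is None:
--             prev = char
--         elif char.isalpha() != prev.isalpha():
--             result += "-"
--         result += char
--         prev = char
--
--     return result
-- ===== SOURCE B (Python) =====
-- def separate_letters_and_numbers(s):
--     n = len(s)
--     cuts = [i for i in range(1, n) if s[i].isalpha() != s[i - 1].isalpha()]
--     bounds = [0] + cuts + [n]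
--     return "-".join(s[i:j] for i, j in zip(bounds, bounds[1:]))
-- ===== Notes on version B (the rewrite author's own statement) =====
-- stated objective: alternative
-- what changed: B is staged: it first computes the list of cut indices where isalpha flips (via an index-range comprehension), then slices the string at consecutive bounds and joins the slices with a dash, instead of A's single character loop that tracks the previous character and appends to a growing result string.
import Mathlib
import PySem

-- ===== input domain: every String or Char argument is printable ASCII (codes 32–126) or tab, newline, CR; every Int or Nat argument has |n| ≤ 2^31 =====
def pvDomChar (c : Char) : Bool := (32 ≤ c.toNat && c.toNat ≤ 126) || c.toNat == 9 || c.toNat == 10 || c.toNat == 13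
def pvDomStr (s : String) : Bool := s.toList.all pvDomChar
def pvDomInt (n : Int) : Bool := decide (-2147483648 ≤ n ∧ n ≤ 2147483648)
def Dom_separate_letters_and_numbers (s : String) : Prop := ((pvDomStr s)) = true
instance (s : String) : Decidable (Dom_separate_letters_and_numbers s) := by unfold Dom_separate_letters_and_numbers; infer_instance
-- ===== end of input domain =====

-- B first computes the list of boundary indices (where isalpha flips), then slices the
-- string at those cut points and joins the slices with a dash — staged passes instead of
-- A's single char-by-char loop tracking the previous character; return values proved equal.

-- ===== PORT A =====
-- A's loop: state is (prev : Option Char, result : List Char); each char appends "-" at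
-- an alpha/non-alpha boundary, then appends the char and updates prev.
def sepAStep (st : Option Char × List Char) (c : Char) : Option Char × List Char :=
  match st.1 with
  | none => (some c, st.2 ++ [c])
  | some p =>
      (some c,
        (if PySem.Chars.isalpha c ≠ PySem.Chars.isalpha p then st.2 ++ ['-'] else st.2) ++ [c])

def separate_letters_and_numbers (s : String) : String :=
  String.mk (s.toList.foldl sepAStep (none, [])).2

-- ===== PORT B =====
-- cuts = [i for i in range(1, n) if s[i].isalpha() != s[i-1].isalpha()]; indices drawn
-- from range(1, n) lie in [1, n), so s[i] and s[i-1] are in bounds and getD is exact here.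
def separate_letters_and_numbers_alt (s : String) : String :=
  let l := s.toList
  let n : Int := (l.length : Int)
  let cuts : List Int := (PySem.List.pyRange 1 n 1).filter
    (fun i => PySem.Chars.isalpha (l.getD i.toNat ' ') != PySem.Chars.isalpha (l.getD (i.toNat - 1) ' '))
  let bounds : List Int := 0 :: (cuts ++ [n])
  String.mk (PySem.Chars.join ['-']
    ((bounds.zip bounds.tail).map (fun p => PySem.List.slice l (some p.1) (some p.2))))

-- ===== PRECONDITION & SPEC =====
def Spec_separate_letters_and_numbers (s : String) (out : String) : Prop := out = separate_letters_and_numbers_alt s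
instance (s : String) (out : String) : Decidable (Spec_separate_letters_and_numbers s out) := by unfold Spec_separate_letters_and_numbers; infer_instance

-- ===== CLAIM (what is proved, stated in full; the proofs are below) =====
def Claim_equal_separate_letters_and_numbers : Prop := ∀ (s : String), Dom_separate_letters_and_numbers s → Spec_separate_letters_and_numbers s (separate_letters_and_numbers s)

-- ===== LEMMAS AND PROOFS =====

-- Functional form of A's loop body after the first character: given the previous char's
-- alpha-ness k, emit "-" before each char whose alpha-ness differs from its predecessor's.
def aLoop (k : Bool) : List Char → List Char
  | [] => []
  | c :: t =>
      (if PySem.Chars.isalpha c ≠ k then ['-'] else []) ++ c :: aLoop (PySem.Chars.isalpha c) t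

theorem foldl_sepAStep_some (l : List Char) (p : Char) (acc : List Char) :
    (l.foldl sepAStep (some p, acc)).2 = acc ++ aLoop (PySem.Chars.isalpha p) l := by
  induction l generalizing p acc with
  | nil => simp [aLoop]
  | cons c t ih =>
      simp only [List.foldl_cons, sepAStep, aLoop, ih]
      split_ifs with h <;> simp

-- Nat-side mirror of B's staged data: ks l = boundary offsets (cut i ↔ k = i - 1),
-- bsN l = the bounds list, piecesOf l bs = the slices between consecutive bounds.
def ks (l : List Char) : List Nat :=
  (List.range (l.length - 1)).filter
    (fun k => PySem.Chars.isalpha (l.getD (k + 1) ' ') != PySem.Chars.isalpha (l.getD k ' '))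

def bsN (l : List Char) : List Nat := 0 :: ((ks l).map (· + 1) ++ [l.length])

def piecesOf (l : List Char) (bs : List Nat) : List (List Char) :=
  (bs.zip bs.tail).map (fun p => (l.drop p.1).take (p.2 - p.1))

theorem piecesOf_cons₂ (l : List Char) (a b : Nat) (bs : List Nat) :
    piecesOf l (a :: b :: bs) = ((l.drop a).take (b - a)) :: piecesOf l (b :: bs) := rfl

theorem piecesOf_shift (c : Char) (t : List Char) (bs : List Nat) :
    piecesOf (c :: t) (bs.map (· + 1)) = piecesOf t bs := by
  simp only [piecesOf, ← List.map_tail, List.zip_map, List.map_map]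
  refine List.map_congr_left ?_
  intro p _
  simp [Prod.map]

theorem ks_cons (c d : Char) (t : List Char) :
    ks (c :: d :: t) =
      (if PySem.Chars.isalpha d != PySem.Chars.isalpha c then [0] else []) ++
        (ks (d :: t)).map (· + 1) := by
  have hcomp : ((fun k => PySem.Chars.isalpha ((c :: d :: t).getD (k + 1) ' ')
        != PySem.Chars.isalpha ((c :: d :: t).getD k ' ')) ∘ Nat.succ)
      = (fun k => PySem.Chars.isalpha ((d :: t).getD (k + 1) ' ')
        != PySem.Chars.isalpha ((d :: t).getD k ' ')) := by
    funext k; rfl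
  simp only [ks, List.length_cons, Nat.add_sub_cancel, List.range_succ_eq_map,
    List.filter_cons, List.filter_map, hcomp]
  have h0 : (c :: d :: t).getD (0 + 1) ' ' = d := rfl
  have h1 : (c :: d :: t).getD 0 ' ' = c := rfl
  rw [h0, h1]
  split_ifs <;> simp

theorem join_cons_piece (c : Char) (x : List Char) (ps : List (List Char)) :
    PySem.Chars.join ['-'] ((c :: x) :: ps) = c :: PySem.Chars.join ['-'] (x :: ps) := by
  cases ps <;> simp [PySem.Chars.join, List.intercalate]

theorem join_single_then (c : Char) (x : List Char) (ps : List (List Char)) :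
    PySem.Chars.join ['-'] ([c] :: x :: ps) = c :: '-' :: PySem.Chars.join ['-'] (x :: ps) := by
  cases ps <;> simp [PySem.Chars.join, List.intercalate]

theorem join_piecesOf_bsN (c : Char) (t : List Char) :
    PySem.Chars.join ['-'] (piecesOf (c :: t) (bsN (c :: t)))
      = c :: aLoop (PySem.Chars.isalpha c) t := by
  induction t generalizing c with
  | nil => simp [bsN, ks, piecesOf, aLoop, PySem.Chars.join, List.intercalate]
  | cons d t2 ih =>
      obtain ⟨z, zs, hz⟩ : ∃ z zs, (ks (d :: t2)).map (· + 1) ++ [(d :: t2).length] = z :: zs := by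
        cases (ks (d :: t2)).map (· + 1) <;> exact ⟨_, _, rfl⟩
      have hbsu : bsN (d :: t2) = 0 :: z :: zs := by rw [bsN, hz]
      have hP : piecesOf (d :: t2) (bsN (d :: t2))
          = (d :: t2).take z :: piecesOf (d :: t2) (z :: zs) := by
        rw [hbsu, piecesOf_cons₂]; simp
      cases hb : (PySem.Chars.isalpha d != PySem.Chars.isalpha c) with
      | true =>
          have hbs : bsN (c :: d :: t2) = 0 :: (bsN (d :: t2)).map (· + 1) := by
            simp [bsN, ks_cons, hb, List.map_append]
          have hne : PySem.Chars.isalpha d ≠ PySem.Chars.isalpha c := by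
            simpa using hb
          rw [hbs, hbsu, List.map_cons, piecesOf_cons₂]
          have h1 : ((1 : Nat) :: (z :: zs).map (· + 1)) = (bsN (d :: t2)).map (· + 1) := by
            rw [hbsu]; rfl
          rw [h1, piecesOf_shift, hP]
          simp only [List.drop_zero, Nat.sub_zero, List.take_succ_cons, List.take_zero]
          rw [join_single_then, ← hP, ih d]
          simp [aLoop, hne]
      | false =>
          have h2 : (ks (c :: d :: t2)).map (· + 1) ++ [(c :: d :: t2).length]
              = (z :: zs).map (· + 1) := by
            rw [ks_cons, hb, ← hz]
            simp [List.map_append, List.map_map]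
          have hbs : bsN (c :: d :: t2) = 0 :: (z :: zs).map (· + 1) := by
            rw [bsN, h2]
          have heq : PySem.Chars.isalpha d = PySem.Chars.isalpha c := by
            simpa using hb
          rw [hbs, List.map_cons, piecesOf_cons₂]
          have h1 : ((z + 1) :: zs.map (· + 1)) = (z :: zs).map (· + 1) := rfl
          rw [h1, piecesOf_shift]
          simp only [List.drop_zero, Nat.sub_zero, List.take_succ_cons]
          rw [join_cons_piece, ← hP, ih d]
          simp [aLoop, heq]

theorem alt_eq (s : String) :
    separate_letters_and_numbers_alt s
      = String.mk (PySem.Chars.join ['-'] (piecesOf s.toList (bsN s.toList))) := by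
  show String.mk (PySem.Chars.join ['-']
      ((((0:Int) :: ((PySem.List.pyRange 1 (s.toList.length:Int) 1).filter
        (fun i => PySem.Chars.isalpha (s.toList.getD i.toNat ' ')
          != PySem.Chars.isalpha (s.toList.getD (i.toNat - 1) ' ')) ++ [(s.toList.length:Int)])).zip
        ((0:Int) :: ((PySem.List.pyRange 1 (s.toList.length:Int) 1).filter
        (fun i => PySem.Chars.isalpha (s.toList.getD i.toNat ' ')
          != PySem.Chars.isalpha (s.toList.getD (i.toNat - 1) ' ')) ++ [(s.toList.length:Int)])).tail).map
        (fun p => PySem.List.slice s.toList (some p.1) (some p.2)))) = _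
  set l := s.toList with hl
  have hfun : ((fun i : Int => PySem.Chars.isalpha (l.getD i.toNat ' ')
        != PySem.Chars.isalpha (l.getD (i.toNat - 1) ' ')) ∘ (fun k : Nat => (1:Int) + k))
      = (fun k => PySem.Chars.isalpha (l.getD (k + 1) ' ') != PySem.Chars.isalpha (l.getD k ' ')) := by
    funext k
    have h1 : ((1:Int) + (k:Int)).toNat = k + 1 := by omega
    simp [Function.comp, h1]
  have hlen : (((l.length : Int)) - 1).toNat = l.length - 1 := by omega
  have hbounds : ((0:Int) :: ((PySem.List.pyRange 1 (l.length:Int) 1).filter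
        (fun i => PySem.Chars.isalpha (l.getD i.toNat ' ')
          != PySem.Chars.isalpha (l.getD (i.toNat - 1) ' ')) ++ [(l.length:Int)]))
      = (bsN l).map (fun a : Nat => (a : Int)) := by
    have hmap : (fun k : Nat => (1:Int) + k) = (fun k : Nat => ((k + 1 : Nat) : Int)) := by
      funext k; push_cast; ring
    rw [PySem.List.pyRange_one, List.filter_map, hlen, hfun, hmap]
    simp [bsN, ks, List.map_map, Function.comp]
  rw [hbounds]
  congr 1
  congr 1
  rw [piecesOf, ← List.map_tail, List.zip_map, List.map_map]
  refine List.map_congr_left ?_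
  intro p _
  simp [Prod.map, PySem.List.slice_natCast]

-- ===== VERDICT (by name: the statement is the Claim_ definition above) =====
theorem separate_letters_and_numbers_spec : Claim_equal_separate_letters_and_numbers := by
  intro s _
  unfold Spec_separate_letters_and_numbers
  rw [alt_eq]
  unfold separate_letters_and_numbers
  cases hl : s.toList with
  | nil => simp [bsN, piecesOf, ks, PySem.Chars.join, List.intercalate]
  | cons c t =>
      rw [join_piecesOf_bsN]
      simp [List.foldl_cons, sepAStep, foldl_sepAStep_some]
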